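-- pv_equiv track=rewrite | github.com/KimBoKwon/CodingTest_Python | Lv1/coke.py | solution
-- ===== SOURCE A (Python) =====
-- def solution(a, b, n):
--     answer = 0
--     left_num = 0
--
--     while n >= a:
--         left_num = n%a
--         n = (n//a) * b
--         answer += n
--         n += left_num
--
--     return answer
-- ===== SOURCE B (Python) =====
-- def solution(a, b, n):
--     if n < a:
--         return 0
--     return (n - b) // (a - b) * b
-- ===== Notes on version B (the rewrite author's own statement) =====
-- stated objective: simpler
-- what changed: Replaces the while-loop simulation of repeated bottle exchanges with the closed form (n-b)//(a-b)*b guarded by n<a.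
-- outside the precondition, e.g. on solution(-2, 3, -2): A returns -3, B returns 3; on solution(3, -5, 6): A returns -10, B returns -5
import Mathlib
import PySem

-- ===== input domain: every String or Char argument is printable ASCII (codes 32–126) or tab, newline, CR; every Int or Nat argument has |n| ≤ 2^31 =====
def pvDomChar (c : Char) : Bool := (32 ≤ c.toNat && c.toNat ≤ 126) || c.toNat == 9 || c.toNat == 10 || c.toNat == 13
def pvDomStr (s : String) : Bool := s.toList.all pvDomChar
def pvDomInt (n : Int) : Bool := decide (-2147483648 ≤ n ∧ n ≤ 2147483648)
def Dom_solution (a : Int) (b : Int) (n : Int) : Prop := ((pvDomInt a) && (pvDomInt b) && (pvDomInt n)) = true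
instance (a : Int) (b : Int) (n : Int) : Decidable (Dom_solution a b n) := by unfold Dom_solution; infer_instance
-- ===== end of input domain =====

-- B replaces A's while-loop exchange simulation with the closed form (n-b)//(a-b)*b (guarded by n<a): simpler, no loop.

-- ===== PORT A =====
-- the while loop of A; the dite guard only ensures totality (inside Pre_ it is exactly 'n >= a')
def solutionGo (a : Int) (b : Int) (n : Int) (answer : Int) : Int :=
  if h : a ≤ n ∧ 0 < a ∧ b < a then
    let left_num := PySem.Int.mod n a
    let n2 := (PySem.Int.floordiv n a) * b
    solutionGo a b (n2 + left_num) (answer + n2)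
  else answer
termination_by (n - a + 1).toNat
decreasing_by
  have ha : 0 < a := h.2.1
  have hfd : PySem.Int.floordiv n a = n / a := PySem.Int.floordiv_eq_ediv_of_pos ha
  have hmd : PySem.Int.mod n a = n % a := PySem.Int.mod_eq_emod_of_pos ha
  have hq : 1 ≤ n / a := (Int.le_ediv_iff_mul_le ha).mpr (by omega)
  have hlt : (PySem.Int.floordiv n a) * b + PySem.Int.mod n a < n := by
    rw [hfd, hmd]
    have hdm : a * (n / a) + n % a = n := Int.ediv_add_emod n a
    nlinarith [h.2.2]
  omega

def solution (a : Int) (b : Int) (n : Int) : Int :=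
  solutionGo a b n 0

-- ===== PORT B =====
def solution_alt (a : Int) (b : Int) (n : Int) : Int :=
  if n < a then 0
  else PySem.Int.floordiv (n - b) (a - b) * b

-- ===== PRECONDITION & SPEC =====
-- Pre_ restricts to the natural coke-machine domain 0 ≤ b < a (plus the trivially-returning n < a);
-- outside it A raises ZeroDivisionError (a = 0), loops forever (e.g. 0 < a ≤ b, or a < 0 with n
-- reaching a fixed point), or returns an accidental value of simulating the exchange with negative
-- counts, which the coke-machine formula does not model.
def Pre_solution (a : Int) (b : Int) (n : Int) : Prop := n < a ∨ (0 < a ∧ 0 ≤ b ∧ b < a)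
instance (a : Int) (b : Int) (n : Int) : Decidable (Pre_solution a b n) := by unfold Pre_solution; infer_instance

def pvWitness_solution : Int × Int × Int := (3, 1, 20)

def Spec_solution (a : Int) (b : Int) (n : Int) (out : Int) : Prop := out = solution_alt a b n
instance (a : Int) (b : Int) (n : Int) (out : Int) : Decidable (Spec_solution a b n out) := by unfold Spec_solution; infer_instance

-- ===== CLAIM (what is proved, stated in full; the proofs are below) =====
def Claim_equal_solution : Prop := ∀ (a : Int) (b : Int) (n : Int), Dom_solution a b n → Pre_solution a b n → Spec_solution a b n (solution a b n)

-- ===== LEMMAS AND PROOFS =====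

-- loop invariant: on the natural domain the loop computes acc + closed form
theorem solutionGo_closed (a b : Int) (ha : 0 < a) (hb : 0 ≤ b) (hba : b < a) :
    ∀ (k : Nat) (n acc : Int), (n - a).toNat = k → a ≤ n →
      solutionGo a b n acc = acc + PySem.Int.floordiv (n - b) (a - b) * b := by
  intro k
  induction k using Nat.strong_induction_on with
  | _ k ih =>
    intro n acc hk hn
    rw [solutionGo]
    have hfd : PySem.Int.floordiv n a = n / a := PySem.Int.floordiv_eq_ediv_of_pos ha
    have hmd : PySem.Int.mod n a = n % a := PySem.Int.mod_eq_emod_of_pos ha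
    have hguard : a ≤ n ∧ 0 < a ∧ b < a := ⟨hn, ha, hba⟩
    rw [dif_pos hguard]
    set q := n / a with hqdef
    have hq1 : 1 ≤ q := by
      have := (Int.le_ediv_iff_mul_le ha (a := 1) (b := n)).mpr (by omega); omega
    have hdm : q * a + n % a = n := by rw [hqdef, mul_comm]; exact Int.ediv_add_emod n a
    have hr0 : 0 ≤ n % a := Int.emod_nonneg n (by omega)
    have hra : n % a < a := Int.emod_lt_of_pos n ha
    set n' := q * b + n % a with hn'def
    have hsplit : n - b = q * (a - b) + (n' - b) := by
      have h2 : q * (a - b) + (n' - b) = q * a + n % a - b := by rw [hn'def]; ring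
      omega
    have hfdsplit : PySem.Int.floordiv (n - b) (a - b) = q + PySem.Int.floordiv (n' - b) (a - b) := by
      rw [PySem.Int.floordiv_eq_ediv_of_pos (by omega), PySem.Int.floordiv_eq_ediv_of_pos (by omega),
          hsplit, add_comm (q * (a - b)), Int.add_mul_ediv_right _ _ (by omega : a - b ≠ 0)]
      ring
    by_cases hstop : n' < a
    · -- loop stops after this iteration
      have hn'b : b ≤ n' := by nlinarith
      have hz : PySem.Int.floordiv (n' - b) (a - b) = 0 := by
        rw [PySem.Int.floordiv_eq_ediv_of_pos (by omega)]
        exact Int.ediv_eq_zero_of_lt (by omega) (by omega)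
      have hguard2 : ¬(a ≤ q * b + n % a ∧ 0 < a ∧ b < a) := by
        rw [← hn'def]; omega
      rw [solutionGo, hfd, hmd, dif_neg hguard2, hfdsplit, hz]
      ring
    · -- loop continues: recurse
      have hlt : n' < n := by nlinarith
      have hnext := ih ((n' - a).toNat) (by omega) n' (acc + q * b) rfl (by omega)
      rw [hfd, hmd]
      show solutionGo a b (q * b + n % a) (acc + q * b) = acc + PySem.Int.floordiv (n - b) (a - b) * b
      rw [← hn'def, hnext, hfdsplit]
      ring

theorem solution_spec_aux (a b n : Int) (h : Pre_solution a b n) :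
    solution a b n = solution_alt a b n := by
  unfold solution solution_alt
  by_cases hn : n < a
  · rw [solutionGo, dif_neg (by omega), if_pos hn]
  · rcases h with h | ⟨ha, hb, hba⟩
    · omega
    · rw [if_neg hn, solutionGo_closed a b ha hb hba _ n 0 rfl (by omega), zero_add]

-- ===== VERDICT (by name: the statement is the Claim_ definition above) =====
theorem solution_spec : Claim_equal_solution := by
  intro a b n _ hpre
  exact solution_spec_aux a b n hpre
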